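-- pv_equiv track=rewrite | github.com/Akinetri/PhysTech-Programming | 3.2.py | fruit_and_animals
-- ===== SOURCE A (Python) =====
-- def fruit_and_animals(s):
--     all_fruits = 0
--     transferred = 0
--     words = s.split()
--
--     for i, word in enumerate(words):
--         if word.isdigit():
--             number = int(word)
--             if i > 0 and words[i - 1] in {"has", "had"}:
--                 all_fruits += number
--             elif i > 0 and words[i - 1] in {"gave", "took"}:
--                 if words[i - 1] == "gave":
--                     transferred += number
--                 elif words[i - 1] == "took":
--                     transferred -= number
--     return all_fruits - transferred
-- ===== SOURCE B (Python) =====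
-- def fruit_and_animals(s):
--     words = s.split()
--
--     def owed(kw):
--         return sum(int(words[i + 1])
--                    for i in range(len(words) - 1)
--                    if words[i] == kw and words[i + 1].isdigit())
--
--     return owed("has") + owed("had") + owed("took") - owed("gave")
-- ===== Notes on version B (the rewrite author's own statement) =====
-- stated objective: alternative
-- what changed: Replaced A's single pass with two accumulators and nested sign branches by four staged per-keyword scans: owed(kw) sums the digit word following each occurrence of kw, and the result is owed(has)+owed(had)+owed(took)-owed(gave).
import Mathlib
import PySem

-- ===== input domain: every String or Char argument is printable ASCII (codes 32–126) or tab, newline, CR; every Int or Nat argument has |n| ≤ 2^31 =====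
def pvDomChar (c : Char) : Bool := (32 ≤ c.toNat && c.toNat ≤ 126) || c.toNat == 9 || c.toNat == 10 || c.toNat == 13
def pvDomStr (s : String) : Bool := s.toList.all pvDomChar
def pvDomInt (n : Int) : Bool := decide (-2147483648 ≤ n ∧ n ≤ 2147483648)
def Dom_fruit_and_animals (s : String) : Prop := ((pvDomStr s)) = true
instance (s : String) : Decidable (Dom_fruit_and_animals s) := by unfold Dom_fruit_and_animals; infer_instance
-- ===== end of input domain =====

-- B replaces A's single pass with two accumulators and nested sign branches by four
-- staged per-keyword scans, combined as owed(has)+owed(had)+owed(took)-owed(gave)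
-- (objective: alternative decomposition, same linear cost).

-- ===== PORT A =====
-- A's loop body: state (all_fruits, transferred), index lookup into the full word list.
def pvStepA (words : List String) (acc : Int × Int) (iw : Int × String) : Int × Int :=
  if PySem.Str.strIsdigit iw.2 then
    let number := (PySem.Int.ofStr? iw.2).getD 0
    if iw.1 > 0 ∧ PySem.List.pyGetD words (iw.1 - 1) "" ∈ (["has", "had"] : List String) then
      (acc.1 + number, acc.2)
    else if iw.1 > 0 ∧ PySem.List.pyGetD words (iw.1 - 1) "" ∈ (["gave", "took"] : List String) then
      if PySem.List.pyGetD words (iw.1 - 1) "" = "gave" then (acc.1, acc.2 + number)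
      else if PySem.List.pyGetD words (iw.1 - 1) "" = "took" then (acc.1, acc.2 - number)
      else acc
    else acc
  else acc

def fruit_and_animals (s : String) : Int :=
  let words := PySem.Str.split₀ s
  let st := (PySem.List.enumerate words 0).foldl (pvStepA words) (0, 0)
  st.1 - st.2

-- ===== PORT B =====
-- owed(kw): sum, over i in range(len(words)-1), of int(words[i+1]) when words[i] == kw
-- and words[i+1] is a digit word (Python generator-sum ported as map + sum with 0 terms).
def pvOwed (words : List String) (kw : String) : Int :=
  ((PySem.List.pyRange 0 ((words.length : Int) - 1) 1).map (fun i =>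
    if PySem.List.pyGetD words i "" = kw ∧
       PySem.Str.strIsdigit (PySem.List.pyGetD words (i + 1) "") then
      (PySem.Int.ofStr? (PySem.List.pyGetD words (i + 1) "")).getD 0
    else 0)).sum

def fruit_and_animals_alt (s : String) : Int :=
  let words := PySem.Str.split₀ s
  pvOwed words "has" + pvOwed words "had" + pvOwed words "took" - pvOwed words "gave"

-- ===== PRECONDITION & SPEC =====
def Spec_fruit_and_animals (s : String) (out : Int) : Prop := out = fruit_and_animals_alt s
instance (s : String) (out : Int) : Decidable (Spec_fruit_and_animals s out) := by unfold Spec_fruit_and_animals; infer_instance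

-- ===== CLAIM =====
def Claim_equal_fruit_and_animals : Prop := ∀ (s : String), Dom_fruit_and_animals s → Spec_fruit_and_animals s (fruit_and_animals s)

-- ===== LEMMAS AND PROOFS =====

-- Net contribution of one enumerated word to A's final value all_fruits - transferred.
def pvContribA (words : List String) (iw : Int × String) : Int :=
  if PySem.Str.strIsdigit iw.2 then
    let number := (PySem.Int.ofStr? iw.2).getD 0
    if iw.1 > 0 ∧ PySem.List.pyGetD words (iw.1 - 1) "" ∈ (["has", "had"] : List String) then
      number
    else if iw.1 > 0 ∧ PySem.List.pyGetD words (iw.1 - 1) "" ∈ (["gave", "took"] : List String) then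
      if PySem.List.pyGetD words (iw.1 - 1) "" = "gave" then -number
      else if PySem.List.pyGetD words (iw.1 - 1) "" = "took" then number
      else 0
    else 0
  else 0

-- Combined per-pair contribution of B's four staged sums (prev word, word).
def pvContribB (pw : String × String) : Int :=
  (if pw.1 = "has" ∧ PySem.Str.strIsdigit pw.2 then (PySem.Int.ofStr? pw.2).getD 0 else 0)
  + (if pw.1 = "had" ∧ PySem.Str.strIsdigit pw.2 then (PySem.Int.ofStr? pw.2).getD 0 else 0)
  + (if pw.1 = "took" ∧ PySem.Str.strIsdigit pw.2 then (PySem.Int.ofStr? pw.2).getD 0 else 0)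
  - (if pw.1 = "gave" ∧ PySem.Str.strIsdigit pw.2 then (PySem.Int.ofStr? pw.2).getD 0 else 0)

lemma pvStepA_diff (words : List String) (acc : Int × Int) (iw : Int × String) :
    (pvStepA words acc iw).1 - (pvStepA words acc iw).2
      = acc.1 - acc.2 + pvContribA words iw := by
  unfold pvStepA pvContribA
  split_ifs <;> ring

lemma pvFoldA_sum (words : List String) :
    ∀ (l : List (Int × String)) (acc : Int × Int),
      (l.foldl (pvStepA words) acc).1 - (l.foldl (pvStepA words) acc).2
        = acc.1 - acc.2 + (l.map (pvContribA words)).sum := by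
  intro l
  induction l with
  | nil => intro acc; simp
  | cons x xs ih =>
      intro acc
      simp only [List.foldl_cons, List.map_cons, List.sum_cons, ih, pvStepA_diff]
      ring

-- the head contributions of the two sums agree once the previous word is in sight
lemma pvHead (ws : List String) (k : Nat) (hk : 0 < k) (hk1 : k - 1 < ws.length) (w : String) :
    pvContribA ws ((k : Int), w) = pvContribB (ws[k - 1], w) := by
  have hprev : PySem.List.pyGetD ws ((k : Int) - 1) "" = ws[k - 1] := by
    have h : ((k : Int) - 1) = ((k - 1 : Nat) : Int) := by omega
    rw [h, PySem.List.pyGetD_natCast, List.getD_eq_getElem?_getD,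
        List.getElem?_eq_getElem hk1, Option.getD_some]
  have hpos : ((k : Int) > 0) := by exact_mod_cast hk
  unfold pvContribA pvContribB
  rw [hprev]
  split_ifs <;> simp_all

lemma pvCore (ws : List String) :
    ∀ (rest : List String) (k : Nat), ws.drop k = rest → 0 < k →
      ((PySem.List.enumerate rest (k : Int)).map (pvContribA ws)).sum
        = (((ws.drop (k - 1)).zip rest).map pvContribB).sum := by
  intro rest
  induction rest with
  | nil => intro k _ _; simp [PySem.List.enumerate]
  | cons w rest' ih =>
      intro k hdrop hk
      have hklen : k < ws.length := by
        by_contra h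
        rw [List.drop_eq_nil_iff.mpr (by omega)] at hdrop
        exact List.cons_ne_nil w rest' hdrop.symm
      have hk1 : k - 1 < ws.length := by omega
      have hdrop1 : ws.drop (k - 1) = ws[k - 1] :: ws.drop k := by
        have h := List.drop_eq_getElem_cons hk1
        rwa [show k - 1 + 1 = k by omega] at h
      have hdrop' : ws.drop (k + 1) = rest' := by
        rw [← List.drop_drop, hdrop]
        rfl
      rw [PySem.List.enumerate_cons, hdrop1, hdrop, List.zip_cons_cons]
      simp only [List.map_cons, List.sum_cons]
      have hrec := ih (k + 1) hdrop' (by omega)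
      have hcast : (k : Int) + 1 = ((k + 1 : Nat) : Int) := by push_cast; ring
      have hdropk : ws.drop ((k + 1) - 1) = ws.drop k := by norm_num
      rw [hcast, hrec, hdropk, hdrop, pvHead ws k hk hk1 w]

lemma pvMain (ws : List String) :
    ((PySem.List.enumerate ws 0).map (pvContribA ws)).sum
      = ((ws.zip ws.tail).map pvContribB).sum := by
  cases ws with
  | nil => simp [PySem.List.enumerate]
  | cons w0 rest =>
      rw [PySem.List.enumerate_cons]
      simp only [List.map_cons, List.sum_cons]
      have h0 : pvContribA (w0 :: rest) (0, w0) = 0 := by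
        unfold pvContribA
        split_ifs <;> simp_all
      rw [h0, zero_add]
      have := pvCore (w0 :: rest) rest 1 rfl (by omega)
      simpa using this

-- Sum over List.range of a pairwise function of consecutive words = sum over zip.
lemma pvZipRange : ∀ (ws : List String) (g : String → String → Int),
    ((List.range (ws.length - 1)).map (fun k => g (ws.getD k "") (ws.getD (k + 1) ""))).sum
      = ((ws.zip ws.tail).map (fun p => g p.1 p.2)).sum := by
  intro ws
  induction ws with
  | nil => intro g; simp
  | cons a t ih =>
      intro g
      cases t with
      | nil => simp
      | cons b t' =>
          have hlen : (a :: b :: t').length - 1 = (b :: t').length - 1 + 1 := by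
            simp
          rw [hlen, List.range_succ_eq_map]
          simp only [List.map_cons, List.sum_cons, List.map_map,
            List.getD_cons_zero, List.getD_cons_succ, List.zip_cons_cons, List.tail_cons]
          congr 1
          have hih := ih g
          simp only [List.tail_cons] at hih
          rw [← hih]
          apply congrArg
          apply List.map_congr_left
          intro k _
          simp [Function.comp]

-- Four staged sums over the same index range combine into one pointwise sum.
lemma pvCombine : ∀ (l : List Int) (f1 f2 f3 f4 : Int → Int),
    (l.map f1).sum + (l.map f2).sum + (l.map f3).sum - (l.map f4).sum
      = (l.map (fun i => f1 i + f2 i + f3 i - f4 i)).sum := by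
  intro l
  induction l with
  | nil => intro f1 f2 f3 f4; simp
  | cons x xs ih =>
      intro f1 f2 f3 f4
      simp only [List.map_cons, List.sum_cons, ← ih]
      ring

-- B's value as a single zip-sum of pvContribB.
lemma pvAlt_eq_zip (ws : List String) :
    pvOwed ws "has" + pvOwed ws "had" + pvOwed ws "took" - pvOwed ws "gave"
      = ((ws.zip ws.tail).map pvContribB).sum := by
  unfold pvOwed
  rw [pvCombine]
  rw [PySem.List.pyRange_one]
  have hnat : (((ws.length : Int) - 1) - 0).toNat = ws.length - 1 := by omega
  rw [hnat]
  rw [List.map_map]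
  have hpt : ∀ k : Nat,
      ((fun i => (if PySem.List.pyGetD ws i "" = "has" ∧
            PySem.Str.strIsdigit (PySem.List.pyGetD ws (i + 1) "") then
            (PySem.Int.ofStr? (PySem.List.pyGetD ws (i + 1) "")).getD 0 else 0)
          + (if PySem.List.pyGetD ws i "" = "had" ∧
            PySem.Str.strIsdigit (PySem.List.pyGetD ws (i + 1) "") then
            (PySem.Int.ofStr? (PySem.List.pyGetD ws (i + 1) "")).getD 0 else 0)
          + (if PySem.List.pyGetD ws i "" = "took" ∧
            PySem.Str.strIsdigit (PySem.List.pyGetD ws (i + 1) "") then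
            (PySem.Int.ofStr? (PySem.List.pyGetD ws (i + 1) "")).getD 0 else 0)
          - (if PySem.List.pyGetD ws i "" = "gave" ∧
            PySem.Str.strIsdigit (PySem.List.pyGetD ws (i + 1) "") then
            (PySem.Int.ofStr? (PySem.List.pyGetD ws (i + 1) "")).getD 0 else 0))
        ∘ (fun k : Nat => (0 : Int) + (k : Int))) k
      = pvContribB (ws.getD k "", ws.getD (k + 1) "") := by
    intro k
    have h0 : (0 : Int) + (k : Int) = ((k : Nat) : Int) := by ring
    have h1 : ((k : Int)) + 1 = (((k + 1 : Nat)) : Int) := by push_cast; ring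
    simp only [Function.comp, h0, h1, PySem.List.pyGetD_natCast]
    rfl
  rw [List.map_congr_left (fun k _ => hpt k)]
  exact pvZipRange ws (fun x y => pvContribB (x, y))

-- ===== VERDICT =====
theorem fruit_and_animals_spec : Claim_equal_fruit_and_animals := by
  intro s _
  unfold Spec_fruit_and_animals fruit_and_animals fruit_and_animals_alt
  rw [pvAlt_eq_zip]
  rw [pvFoldA_sum]
  simpa using pvMain (PySem.Str.split₀ s)
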